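-- pv_equiv track=rewrite | github.com/seafooler/bdt | benchmark/logs.py | _merge_nodes_proposal
-- ===== SOURCE A (Python) =====
-- def _merge_nodes_proposal(input):
--     #单纯的为了合并4个dict，可以偷偷把commit时间算成最早的,同时我们忽略前两个块
--     merged = {}
--     for x in input:
--         for k, t in x:
--             if not k in merged or merged[k] > t:
--                 merged[k] = t
--     if '0' in merged.keys():
--         merged.pop('0')
--     if '1' in merged.keys():
--         merged.pop('1')
--
--     return merged
-- ===== SOURCE B (Python) =====
-- def _merge_nodes_proposal(input):
--     # Two-pass: group all observed times per key, then take min per key,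
--     # filtering out keys '0' and '1' in the comprehension.
--     groups = {}
--     for x in input:
--         for k, t in x:
--             groups.setdefault(k, []).append(t)
--     return {k: min(ts) for k, ts in groups.items() if k not in ('0', '1')}
-- ===== Notes on version B (the rewrite author's own statement) =====
-- stated objective: alternative
-- what changed: Replaces the running-min merge with conditional overwrite plus pop('0')/pop('1') by an index-building pass grouping all times per key and a second dict-comprehension pass taking min(ts) per key while filtering '0'/'1'.
import Mathlib
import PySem

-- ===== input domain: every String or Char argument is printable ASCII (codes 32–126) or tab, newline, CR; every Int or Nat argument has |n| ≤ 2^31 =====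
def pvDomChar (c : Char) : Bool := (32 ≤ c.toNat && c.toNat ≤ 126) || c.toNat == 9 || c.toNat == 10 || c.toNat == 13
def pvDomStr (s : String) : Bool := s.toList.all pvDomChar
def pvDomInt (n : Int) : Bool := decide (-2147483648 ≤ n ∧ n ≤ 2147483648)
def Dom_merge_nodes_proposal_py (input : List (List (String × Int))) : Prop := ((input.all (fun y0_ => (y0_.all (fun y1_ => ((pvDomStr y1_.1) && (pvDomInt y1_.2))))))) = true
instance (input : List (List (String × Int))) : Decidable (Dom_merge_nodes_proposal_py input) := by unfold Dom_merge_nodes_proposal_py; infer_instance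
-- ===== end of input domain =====

-- B replaces A's running-min merge with conditional overwrite plus pop('0')/pop('1')
-- by a grouping pass collecting all times per key and a second pass taking min per key
-- while filtering keys '0'/'1' (objective: alternative decomposition, same cost).

-- ===== PORT A =====
-- one loop body: if not k in merged or merged[k] > t: merged[k] = t
def mergeStepA (m : PySem.Dict String Int) (p : String × Int) : PySem.Dict String Int :=
  match m.get? p.1 with
  | none => m.insert p.1 p.2
  | some v => if v > p.2 then m.insert p.1 p.2 else m

def merge_nodes_proposal_py (input : List (List (String × Int))) : List (String × Int) :=
  let merged := input.foldl (fun m x => x.foldl mergeStepA m) PySem.Dict.empty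
  let merged := if merged.contains "0" then merged.erase "0" else merged
  let merged := if merged.contains "1" then merged.erase "1" else merged
  merged.items

-- ===== PORT B =====
-- Python min(ts); in B 'ts' is always a nonempty group, the [] case is unreachable
def pyMinList : List Int → Int
  | [] => 0
  | x :: t => t.foldl min x

def merge_nodes_proposal_py_alt (input : List (List (String × Int))) : List (String × Int) :=
  let groups := input.foldl
    (fun g x => x.foldl (fun g p => g.modify p.1 [] (fun ts => ts ++ [p.2])) g)
    PySem.Dict.empty
  (groups.items.filter (fun p => !(p.1 == "0" || p.1 == "1"))).map
    (fun p => (p.1, pyMinList p.2))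

-- ===== PRECONDITION & SPEC =====
def Spec_merge_nodes_proposal_py (input : List (List (String × Int))) (out : List (String × Int)) : Prop := out = merge_nodes_proposal_py_alt input
instance (input : List (List (String × Int))) (out : List (String × Int)) : Decidable (Spec_merge_nodes_proposal_py input out) := by unfold Spec_merge_nodes_proposal_py; infer_instance

-- ===== CLAIM (what is proved, stated in full; the proofs are below) =====
def Claim_equal_merge_nodes_proposal_py : Prop := ∀ (input : List (List (String × Int))), Dom_merge_nodes_proposal_py input → Spec_merge_nodes_proposal_py input (merge_nodes_proposal_py input)

-- ===== LEMMAS AND PROOFS =====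

-- the A-loop over the flattened pair list
def mergeA (ps : List (String × Int)) : PySem.Dict String Int :=
  ps.foldl mergeStepA PySem.Dict.empty

-- the B grouping loop over the flattened pair list
def groupB (ps : List (String × Int)) : PySem.Dict String (List Int) :=
  ps.foldl (fun g p => g.modify p.1 [] (fun ts => ts ++ [p.2])) PySem.Dict.empty

-- one A-step changes no other key
theorem get?_mergeStepA_ne (m : PySem.Dict String Int) (p : String × Int) (k : String)
    (h : p.1 ≠ k) : (mergeStepA m p).get? k = m.get? k := by
  unfold mergeStepA
  cases m.get? p.1 with
  | none => exact PySem.Dict.get?_insert_of_ne m p.2 h.symm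
  | some v =>
    by_cases hv : v > p.2
    · simp only [if_pos hv]; exact PySem.Dict.get?_insert_of_ne m p.2 h.symm
    · simp only [if_neg hv]

-- one A-step adds exactly the key of the processed pair
theorem keys_mergeStepA (m : PySem.Dict String Int) (p : String × Int) :
    (mergeStepA m p).keys = PySem.Set.add m.keys p.1 := by
  unfold mergeStepA
  cases hg : m.get? p.1 with
  | none =>
    have hc : m.contains p.1 = false := by
      rw [PySem.Dict.contains_eq_isSome_get?, hg]; rfl
    have hmem : p.1 ∉ m.keys := by
      intro hm
      rw [← PySem.Dict.contains_iff_mem_keys] at hm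
      simp [hc] at hm
    rw [PySem.Dict.keys_insert_of_not_contains m p.2 hc]
    simp [PySem.Set.add, PySem.Set.contains, hmem]
  | some v =>
    have hc : m.contains p.1 = true := by
      rw [PySem.Dict.contains_eq_isSome_get?, hg]; rfl
    have hmem : p.1 ∈ m.keys := (PySem.Dict.contains_iff_mem_keys m p.1).mp hc
    have hadd : PySem.Set.add m.keys p.1 = m.keys := by
      simp [PySem.Set.add, PySem.Set.contains, hmem]
    by_cases hv : v > p.2
    · simp only [if_pos hv]
      rw [PySem.Dict.keys_insert_of_contains m p.2 hc, hadd]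
    · simp only [if_neg hv, hadd]

-- the A-dict's keys are the distinct keys seen, in first-appearance order
theorem keys_mergeA (ps : List (String × Int)) :
    (mergeA ps).keys = PySem.Set.ofList (ps.map (fun p => p.1)) := by
  induction ps using List.reverseRecOn with
  | nil => simp [mergeA, PySem.Set.ofList, PySem.Set.empty]
  | append_singleton l p ih =>
    unfold mergeA at *
    rw [List.foldl_append, List.foldl_cons, List.foldl_nil, keys_mergeStepA, ih,
      List.map_append]
    simp [PySem.Set.ofList, List.foldl_append]

-- the A-dict's value at k is the running min of all times recorded for k
theorem get?_mergeA (ps : List (String × Int)) (k : String) :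
    (mergeA ps).get? k =
      match (ps.filter (fun p => p.1 == k)).map (fun p => p.2) with
      | [] => none
      | x :: t => some (t.foldl min x) := by
  induction ps using List.reverseRecOn with
  | nil => simp [mergeA, PySem.Dict.get?_empty]
  | append_singleton l p ih =>
    unfold mergeA at *
    rw [List.foldl_append, List.foldl_cons, List.foldl_nil]
    generalize hM : List.foldl mergeStepA PySem.Dict.empty l = M at ih ⊢
    by_cases hk : p.1 = k
    · subst hk
      rw [List.filter_append, List.map_append]
      simp only [List.filter_cons, List.filter_nil, beq_self_eq_true, if_pos, List.map_cons,
        List.map_nil]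
      cases hts : (l.filter (fun q => q.1 == p.1)).map (fun q => q.2) with
      | nil =>
        rw [hts] at ih
        unfold mergeStepA
        rw [ih]
        simp [PySem.Dict.get?_insert_self]
      | cons x t =>
        rw [hts] at ih
        unfold mergeStepA
        rw [ih]
        simp only [List.cons_append]
        rw [List.foldl_append]
        simp only [List.foldl_cons, List.foldl_nil]
        by_cases hv : t.foldl min x > p.2
        · rw [if_pos hv, PySem.Dict.get?_insert_self, min_eq_right (le_of_lt hv)]
        · rw [if_neg hv, ih, min_eq_left (not_lt.mp hv)]
    · rw [get?_mergeStepA_ne _ _ _ hk, ih]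
      have : (l ++ [p]).filter (fun q => q.1 == k) = l.filter (fun q => q.1 == k) := by
        rw [List.filter_append]
        simp [hk]
      rw [this]

-- the B-dict's keys are the same distinct keys
theorem keys_groupB (ps : List (String × Int)) :
    (groupB ps).keys = PySem.Set.ofList (ps.map (fun p => p.1)) := by
  unfold groupB
  rw [PySem.Dict.keys_foldl_modify_key ps (fun p => p.1) [] (fun _ p ts => ts ++ [p.2])]
  rfl

-- the B-dict's value at k is the list of all times recorded for k
theorem getD_groupB (ps : List (String × Int)) (k : String) :
    (groupB ps).getD k [] = (ps.filter (fun p => p.1 == k)).map (fun p => p.2) := by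
  unfold groupB
  rw [PySem.Dict.getD_foldl_modify_append]
  simp [PySem.Dict.getD_empty]

theorem nodup_keys_mergeA (ps : List (String × Int)) : (mergeA ps).keys.Nodup := by
  rw [keys_mergeA]; exact PySem.Set.nodup_ofList _

theorem nodup_keys_groupB (ps : List (String × Int)) : (groupB ps).keys.Nodup := by
  rw [keys_groupB]; exact PySem.Set.nodup_ofList _

-- core correspondence: A's merged dict is B's groups dict with min taken per key
theorem items_mergeA_eq (ps : List (String × Int)) :
    (mergeA ps).items = ((groupB ps).items).map (fun p => (p.1, pyMinList p.2)) := by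
  rw [PySem.Dict.items_eq_map_keys (mergeA ps) (nodup_keys_mergeA ps) 0,
    PySem.Dict.items_eq_map_keys (groupB ps) (nodup_keys_groupB ps) [],
    List.map_map, keys_mergeA, keys_groupB]
  apply List.map_congr_left
  intro k hk
  simp only [Function.comp]
  congr 1
  have hmem : k ∈ ps.map (fun p => p.1) := (PySem.Set.mem_ofList _ k).mp hk
  have hne : (ps.filter (fun p => p.1 == k)).map (fun p => p.2) ≠ [] := by
    simp only [ne_eq, List.map_eq_nil_iff, List.filter_eq_nil_iff]
    intro h
    obtain ⟨p, hp, hpk⟩ := List.mem_map.mp hmem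
    exact absurd (by simp [hpk]) (h p hp)
  rw [getD_groupB]
  rw [PySem.Dict.getD_eq_get?_getD, get?_mergeA]
  cases hts : (ps.filter (fun p => p.1 == k)).map (fun p => p.2) with
  | nil => exact absurd hts hne
  | cons x t => simp [pyMinList]

-- an erase guarded by a membership test is exactly a filter on the items
theorem items_guard_erase (d : PySem.Dict String Int) (k : String) :
    (if d.contains k then d.erase k else d).items =
      d.items.filter (fun p => !(p.1 == k)) := by
  by_cases hc : d.contains k = true
  · simp only [if_pos hc]
    rfl
  · simp only [hc, if_neg, Bool.false_eq_true, not_false_iff]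
    have hnk : k ∉ d.keys := by
      intro hm
      rw [← PySem.Dict.contains_iff_mem_keys] at hm
      exact hc hm
    symm
    apply List.filter_eq_self.mpr
    intro p hp
    have : p.1 ∈ d.keys := PySem.Dict.mem_keys_of_mem_items d hp
    simp only [Bool.not_eq_eq_eq_not, Bool.not_true, beq_eq_false_iff_ne, ne_eq]
    intro he
    exact hnk (he ▸ this)

-- ===== VERDICT (by name: the statement is the Claim_ definition above) =====
theorem merge_nodes_proposal_py_spec : Claim_equal_merge_nodes_proposal_py := by
  unfold Claim_equal_merge_nodes_proposal_py
  intro input _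
  unfold Spec_merge_nodes_proposal_py merge_nodes_proposal_py merge_nodes_proposal_py_alt
  simp only [← List.foldl_flatten]
  rw [show input.flatten.foldl mergeStepA PySem.Dict.empty = mergeA input.flatten from rfl,
    show input.flatten.foldl (fun g p => g.modify p.1 [] (fun ts => ts ++ [p.2]))
        PySem.Dict.empty = groupB input.flatten from rfl]
  rw [items_guard_erase, items_guard_erase, List.filter_filter, items_mergeA_eq,
    List.filter_map]
  congr 1
  apply List.filter_congr
  intro p _
  show (!(p.1 == "1") && !(p.1 == "0")) = !(p.1 == "0" || p.1 == "1")
  cases p.1 == "0" <;> cases p.1 == "1" <;> rfl
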